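-- pv_equiv track=rewrite | github.com/zkaedii/zcc | fix_const_folding.py | find_parse_stmt_decl_section
-- ===== SOURCE A (Python) =====
-- def find_parse_stmt_decl_section(lines):
--     """Find the declaration handling section in parse_stmt()."""
--
--     # Strategy: Look for parse_stmt function, then find where it handles declarations
--     # We want to insert after a variable is declared and initialized
--
--     in_parse_stmt = False
--     decl_section_start = -1
--
--     for i, line in enumerate(lines):
--         # Find parse_stmt function
--         if 'Node *parse_stmt(' in line or 'parse_stmt(Compiler' in line:
--             in_parse_stmt = True
--             continue
--
--         if in_parse_stmt:
--             # Look for variable declaration handling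
--             # Common patterns: "if (is_type_token", "Type *type = parse_type"
--             if 'parse_type(' in line or 'is_type_token' in line:
--                 decl_section_start = i
--                 break
--
--     return decl_section_start
-- ===== SOURCE B (Python) =====
-- def find_parse_stmt_decl_section(lines):
--     """Index-set formulation: collect all header-line indices and all
--     declaration-line indices with comprehensions, then return the first
--     declaration index that exceeds the first header index and is not itself
--     a header index."""
--     HEADERS = ('Node *parse_stmt(', 'parse_stmt(Compiler')
--     DECLS = ('parse_type(', 'is_type_token')
--     header_ixs = [i for i, l in enumerate(lines) if any(p in l for p in HEADERS)]
--     if not header_ixs: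
--         return -1
--     h0 = header_ixs[0]
--     header_set = set(header_ixs)
--     decl_ixs = [i for i, l in enumerate(lines) if any(p in l for p in DECLS)]
--     for i in decl_ixs:
--         if i > h0 and i not in header_set:
--             return i
--     return -1
-- ===== Notes on version B (the rewrite author's own statement) =====
-- stated objective: alternative
-- what changed: Replaced A's single-pass boolean-flag state machine with an index-set formulation: comprehensions collect the list of header-line indices and the list of declaration-line indices, and the answer is the first declaration index greater than the first header index that is not itself a header index.
import Mathlib
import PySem

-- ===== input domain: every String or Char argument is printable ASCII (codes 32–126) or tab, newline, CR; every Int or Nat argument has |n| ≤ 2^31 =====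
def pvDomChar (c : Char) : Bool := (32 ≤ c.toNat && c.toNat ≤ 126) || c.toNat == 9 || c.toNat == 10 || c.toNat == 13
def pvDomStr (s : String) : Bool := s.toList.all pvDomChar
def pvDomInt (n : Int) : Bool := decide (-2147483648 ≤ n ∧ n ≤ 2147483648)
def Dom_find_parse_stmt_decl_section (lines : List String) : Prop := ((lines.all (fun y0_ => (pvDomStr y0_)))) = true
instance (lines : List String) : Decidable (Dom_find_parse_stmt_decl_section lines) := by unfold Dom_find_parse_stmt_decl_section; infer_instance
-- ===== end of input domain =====

-- B replaces A's boolean-flag state machine by an index-set formulation: collect all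
-- header indices and all declaration indices, then take the first declaration index
-- beyond the first header index that is not itself a header (objective: alternative).

-- ===== PORT A =====
-- A's single loop, with the in_parse_stmt flag and the enumerate counter as state.
def pvGoA (ls : List String) (i : Nat) (inParse : Bool) : Int :=
  match ls with
  | [] => -1
  | l :: rest =>
    if PySem.Str.isIn "Node *parse_stmt(" l || PySem.Str.isIn "parse_stmt(Compiler" l then
      pvGoA rest (i + 1) true
    else if inParse && (PySem.Str.isIn "parse_type(" l || PySem.Str.isIn "is_type_token" l) then
      (i : Int)
    else
      pvGoA rest (i + 1) inParse

def find_parse_stmt_decl_section (lines : List String) : Int :=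
  pvGoA lines 0 false

-- ===== PORT B =====
def pvIsHeader (l : String) : Bool :=
  PySem.Str.isIn "Node *parse_stmt(" l || PySem.Str.isIn "parse_stmt(Compiler" l

def pvIsDecl (l : String) : Bool :=
  PySem.Str.isIn "parse_type(" l || PySem.Str.isIn "is_type_token" l

-- Source B's index comprehension '[i for i, l in enumerate(lines) if p(l)]'
def pvIxsFrom (p : String → Bool) (ls : List String) (i : Nat) : List Nat :=
  match ls with
  | [] => []
  | l :: rest => if p l then i :: pvIxsFrom p rest (i + 1) else pvIxsFrom p rest (i + 1)

-- Source B's final for-loop over decl_ixs ('i not in header_set' ported as list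
-- membership on the distinct header indices, which is the same test)
def pvFindGt (h0 : Nat) (hs : List Nat) (ds : List Nat) : Int :=
  match ds with
  | [] => -1
  | i :: rest => if h0 < i && !(hs.contains i) then (i : Int) else pvFindGt h0 hs rest

def find_parse_stmt_decl_section_alt (lines : List String) : Int :=
  match pvIxsFrom pvIsHeader lines 0 with
  | [] => -1
  | h0 :: _ => pvFindGt h0 (pvIxsFrom pvIsHeader lines 0) (pvIxsFrom pvIsDecl lines 0)

-- ===== PRECONDITION & SPEC =====
def Spec_find_parse_stmt_decl_section (lines : List String) (out : Int) : Prop := out = find_parse_stmt_decl_section_alt lines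
instance (lines : List String) (out : Int) : Decidable (Spec_find_parse_stmt_decl_section lines out) := by unfold Spec_find_parse_stmt_decl_section; infer_instance

-- ===== CLAIM (what is proved, stated in full; the proofs are below) =====
def Claim_equal_find_parse_stmt_decl_section : Prop := ∀ (lines : List String), Dom_find_parse_stmt_decl_section lines → Spec_find_parse_stmt_decl_section lines (find_parse_stmt_decl_section lines)

-- ===== LEMMAS AND PROOFS =====

-- first index of a header line (used only as a proof intermediate)
def pvFindHeader (ls : List String) (i : Nat) : Option Nat :=
  match ls with
  | [] => none
  | l :: rest => if pvIsHeader l then some i else pvFindHeader rest (i + 1)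

-- first index ≥ i of a non-header declaration line (proof intermediate)
def pvSearchDecl (ls : List String) (i : Nat) : Int :=
  match ls with
  | [] => -1
  | l :: rest => if !pvIsHeader l && pvIsDecl l then (i : Int) else pvSearchDecl rest (i + 1)

-- positional scan form of B's final loop (proof intermediate)
def pvScan (h0 : Nat) (ls : List String) (i : Nat) : Int :=
  match ls with
  | [] => -1
  | l :: rest => if pvIsDecl l && h0 < i && !pvIsHeader l then (i : Int) else pvScan h0 rest (i + 1)

-- ===== A-side lemmas =====

lemma pvGoA_true_eq_searchDecl (ls : List String) (i : Nat) :
    pvGoA ls i true = pvSearchDecl ls i := by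
  induction ls generalizing i with
  | nil => rfl
  | cons l rest ih =>
    have hH : (PySem.Str.isIn "Node *parse_stmt(" l || PySem.Str.isIn "parse_stmt(Compiler" l) = pvIsHeader l := rfl
    have hD : (PySem.Str.isIn "parse_type(" l || PySem.Str.isIn "is_type_token" l) = pvIsDecl l := rfl
    simp only [pvGoA, pvSearchDecl, hH, hD]
    cases hh : pvIsHeader l <;> cases hd : pvIsDecl l <;>
      simp only [Bool.not_true, Bool.not_false, Bool.and_self, Bool.and_true, Bool.and_false,
        if_true, if_false, ih, Bool.false_eq_true]

lemma pvFindHeader_shift (ls : List String) (i : Nat) :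
    pvFindHeader ls i = (pvFindHeader ls 0).map (fun k => k + i) := by
  induction ls generalizing i with
  | nil => rfl
  | cons l rest ih =>
    simp only [pvFindHeader]
    cases hh : pvIsHeader l
    · simp only [Bool.false_eq_true, if_false, ih (i + 1), ih 1, Option.map_map]
      rcases pvFindHeader rest 0 with _ | k
      · rfl
      · simp only [Option.map_some, Function.comp_apply]
        congr 1
        omega
    · simp

lemma pvGoA_false_eq (ls : List String) (i : Nat) :
    pvGoA ls i false =
      match pvFindHeader ls 0 with
      | none => -1
      | some s => pvSearchDecl (ls.drop (s + 1)) (i + s + 1) := by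
  induction ls generalizing i with
  | nil => rfl
  | cons l rest ih =>
    have hH : (PySem.Str.isIn "Node *parse_stmt(" l || PySem.Str.isIn "parse_stmt(Compiler" l) = pvIsHeader l := rfl
    simp only [pvGoA, pvFindHeader, hH]
    cases hh : pvIsHeader l
    · simp only [Bool.false_eq_true, if_false, Bool.false_and, ih (i + 1),
        pvFindHeader_shift rest 1]
      rcases pvFindHeader rest 0 with _ | k
      · rfl
      · simp only [Option.map_some, List.drop_succ_cons]
        congr 1
        omega
    · simp only [if_true, pvGoA_true_eq_searchDecl, Nat.add_zero]
      norm_num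

-- ===== B-side lemmas =====

lemma pvFindHeader_eq_head (ls : List String) (i : Nat) :
    pvFindHeader ls i = (pvIxsFrom pvIsHeader ls i).head? := by
  induction ls generalizing i with
  | nil => rfl
  | cons l rest ih =>
    simp only [pvFindHeader, pvIxsFrom]
    cases hh : pvIsHeader l <;> simp [ih]

lemma pvIxsFrom_mem_ge (p : String → Bool) (ls : List String) (i k : Nat)
    (hk : k ∈ pvIxsFrom p ls i) : i ≤ k := by
  induction ls generalizing i with
  | nil => simp [pvIxsFrom] at hk
  | cons l rest ih =>
    simp only [pvIxsFrom] at hk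
    split at hk
    · rcases List.mem_cons.mp hk with h | h
      · omega
      · have := ih (i + 1) h; omega
    · have := ih (i + 1) hk; omega

lemma pvIxsFrom_contains (p : String → Bool) (ls : List String) (i j : Nat)
    (hj : j < ls.length) :
    (pvIxsFrom p ls i).contains (i + j) = p ls[j] := by
  induction ls generalizing i j with
  | nil => simp at hj
  | cons l rest ih =>
    simp only [pvIxsFrom]
    cases j with
    | zero =>
      cases hp : p l
      · simp only [Bool.false_eq_true, if_false, List.getElem_cons_zero, hp]
        rw [Bool.eq_false_iff]
        intro hmem
        have := pvIxsFrom_mem_ge p rest (i + 1) (i + 0) (by simpa using hmem)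
        omega
      · simp [hp]
    | succ j' =>
      have hj' : j' < rest.length := by simpa using hj
      have hrec : (pvIxsFrom p rest (i + 1)).contains (i + (j' + 1)) = p rest[j'] := by
        have := ih (i + 1) j' hj'
        simpa [Nat.add_assoc, Nat.add_comm 1 j'] using this
      cases hp : p l
      · simpa using hrec
      · simp only [if_true, List.contains_cons, hrec, List.getElem_cons_succ]
        have hne : ((i + (j' + 1)) == i) = false := by
          rw [beq_eq_false_iff_ne]; omega
        have hne2 : (i == i + (j' + 1)) = false := by
          rw [beq_eq_false_iff_ne]; omega
        simp [hne]

-- B's final loop over the decl index list equals a positional scan over the lines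
lemma pvFindGt_eq_scan (h0 : Nat) (hs : List Nat) (ls : List String) (i : Nat)
    (hrel : ∀ j, (hj : j < ls.length) → hs.contains (i + j) = pvIsHeader ls[j]) :
    pvFindGt h0 hs (pvIxsFrom pvIsDecl ls i) = pvScan h0 ls i := by
  induction ls generalizing i with
  | nil => rfl
  | cons l rest ih =>
    have h0rel : hs.contains i = pvIsHeader l := by
      simpa using hrel 0 (by simp)
    have hrest : ∀ j, (hj : j < rest.length) → hs.contains ((i + 1) + j) = pvIsHeader rest[j] := by
      intro j hj
      have := hrel (j + 1) (by simpa using Nat.succ_lt_succ hj)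
      simpa [Nat.add_assoc, Nat.add_comm 1 j] using this
    simp only [pvIxsFrom, pvScan]
    cases hd : pvIsDecl l
    · simp only [Bool.false_eq_true, if_false, Bool.false_and, ih (i + 1) hrest]
    · simp only [if_true, pvFindGt, h0rel, Bool.true_and, ih (i + 1) hrest]

-- positions ≤ h0 are skipped by the h0 < i test
lemma pvScan_skip (h0 : Nat) (ls : List String) (i : Nat) (hi : i ≤ h0) :
    pvScan h0 ls i = pvScan h0 (ls.drop (h0 + 1 - i)) (h0 + 1) := by
  induction ls generalizing i with
  | nil => simp [pvScan, List.drop_nil]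
  | cons l rest ih =>
    have hlt : (h0 < i) = False := by simp; omega
    simp only [pvScan, hlt, decide_false, Bool.and_false, Bool.false_and]
    have hdrop : (l :: rest).drop (h0 + 1 - i) = rest.drop (h0 + 1 - (i + 1)) := by
      have h1 : h0 + 1 - i = (h0 + 1 - (i + 1)) + 1 := by omega
      simp [h1]
    rw [hdrop]
    by_cases hi1 : i + 1 ≤ h0
    · exact ih (i + 1) hi1
    · have : h0 + 1 - (i + 1) = 0 := by omega
      have hieq : i + 1 = h0 + 1 := by omega
      simp [hieq]

-- past h0 the positional scan is exactly A's tail search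
lemma pvScan_gt (h0 : Nat) (ls : List String) (i : Nat) (hi : h0 < i) :
    pvScan h0 ls i = pvSearchDecl ls i := by
  induction ls generalizing i with
  | nil => rfl
  | cons l rest ih =>
    have hlt : (h0 < i) = True := by simp [hi]
    simp only [pvScan, pvSearchDecl, hlt, decide_true, Bool.and_true]
    cases hh : pvIsHeader l <;> cases hd : pvIsDecl l <;>
      simp [ih (i + 1) (by omega)]

-- ===== VERDICT (by name: the statement is the Claim_ definition above) =====
theorem find_parse_stmt_decl_section_spec : Claim_equal_find_parse_stmt_decl_section := by
  intro lines _
  unfold Spec_find_parse_stmt_decl_section find_parse_stmt_decl_section find_parse_stmt_decl_section_alt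
  rw [pvGoA_false_eq lines 0]
  have hhead := pvFindHeader_eq_head lines 0
  rcases hH : pvIxsFrom pvIsHeader lines 0 with _ | ⟨h0, hs⟩
  · rw [hH] at hhead; simp at hhead
    rw [hhead]
  · rw [hH] at hhead; simp at hhead
    rw [hhead]
    have hrel : ∀ j, (hj : j < lines.length) →
        (pvIxsFrom pvIsHeader lines 0).contains (0 + j) = pvIsHeader lines[j] := by
      intro j hj; exact pvIxsFrom_contains pvIsHeader lines 0 j hj
    have := pvFindGt_eq_scan h0 (pvIxsFrom pvIsHeader lines 0) lines 0
      (by intro j hj; simpa using hrel j hj)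
    rw [hH] at this
    change pvSearchDecl (List.drop (h0 + 1) lines) (0 + h0 + 1) =
      pvFindGt h0 (h0 :: hs) (pvIxsFrom pvIsDecl lines 0)
    rw [this, pvScan_skip h0 lines 0 (by omega), pvScan_gt h0 _ (h0 + 1) (by omega)]
    simp
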